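-- pv_equiv track=rewrite | github.com/dannyxn/Graphs-Toolbox | converters/type_conversions.py | convert_graph_seq_to_adj_matrix
-- ===== SOURCE A (Python) =====
-- from collections import defaultdict, OrderedDict
--
-- def convert_graph_seq_to_adj_matrix(graph_sequence: list) -> list:
--     """
--         convert_graph_seq_to_adj_matrix method uses given
--         graphic sequence to generate adjacency matrix
--     """
--     seq_len = len(graph_sequence)
--     adj_matrix = [[0 for j in range(seq_len)] for i in range(seq_len)]
--     graph_sequence = list(sorted(graph_sequence, reverse=True))
--     od = OrderedDict()
--     for i in range(len(graph_sequence)):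
--         od[i] = graph_sequence[i]
--     graph_sequence = od
--     while True:
--         node, y = graph_sequence.popitem(last=False)
--         x = 0
--         for key, value in graph_sequence.items():
--             if x < y:
--                 graph_sequence[key] -= 1
--                 adj_matrix[key][node] = 1
--                 adj_matrix[node][key] = 1
--             x += 1
--         graph_sequence = OrderedDict(sorted(graph_sequence.items(), key=lambda kv: kv[1], reverse=True))
--         if sum(graph_sequence.values()) == 0:
--             break
--     return adj_matrix
-- ===== SOURCE B (Python) =====
-- def convert_graph_seq_to_adj_matrix(graph_sequence: list) -> list:
--     """Havel-Hakimi building the adjacency matrix; keeps the working list of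
--     (node, residual degree) pairs sorted by a linear two-run merge instead of
--     re-sorting the whole dictionary each round."""
--     n = len(graph_sequence)
--     adj = [[0] * n for _ in range(n)]
--     order = sorted(graph_sequence, reverse=True)
--     rest = [(i, order[i]) for i in range(n)]
--     while rest:
--         node, y = rest[0]
--         rest = rest[1:]
--         k = min(max(y, 0), len(rest))
--         dec = [(key, v - 1) for key, v in rest[:k]]
--         for key, _ in dec:
--             adj[key][node] = 1
--             adj[node][key] = 1
--         rest = _merge_desc(dec, rest[k:])
--         if sum(v for _, v in rest) == 0:
--             break
--     return adj
--
--
-- def _merge_desc(xs, ys):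
--     """Stable merge of two lists sorted by descending value; ties take from xs."""
--     out = []
--     i = j = 0
--     while i < len(xs) and j < len(ys):
--         if ys[j][1] <= xs[i][1]:
--             out.append(xs[i]); i += 1
--         else:
--             out.append(ys[j]); j += 1
--     out.extend(xs[i:])
--     out.extend(ys[j:])
--     return out
-- ===== Notes on version B (the rewrite author's own statement) =====
-- stated objective: faster
-- what changed: Each Havel-Hakimi round no longer re-sorts the whole degree dictionary: after decrementing the prefix, the two still-sorted runs (decremented prefix, untouched suffix) are combined by a linear stable merge, and the OrderedDict machinery is replaced by a plain list of (node, degree) pairs.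
import Mathlib
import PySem

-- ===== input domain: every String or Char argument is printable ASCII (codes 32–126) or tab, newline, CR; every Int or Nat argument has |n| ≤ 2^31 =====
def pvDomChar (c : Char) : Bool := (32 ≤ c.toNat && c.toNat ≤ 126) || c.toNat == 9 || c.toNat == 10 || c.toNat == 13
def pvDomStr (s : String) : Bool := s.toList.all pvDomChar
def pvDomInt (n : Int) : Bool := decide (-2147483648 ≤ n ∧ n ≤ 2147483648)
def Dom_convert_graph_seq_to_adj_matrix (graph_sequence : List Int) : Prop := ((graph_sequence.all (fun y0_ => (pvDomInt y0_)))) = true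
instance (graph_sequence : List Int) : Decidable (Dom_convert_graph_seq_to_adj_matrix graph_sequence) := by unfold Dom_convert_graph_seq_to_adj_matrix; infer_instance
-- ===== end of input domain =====

-- B replaces A's full stable re-sort of the degree dictionary in every Havel-Hakimi round
-- by a linear stable merge of the two already-sorted runs (decremented prefix, untouched suffix).

-- ===== PORT A =====
-- adj[i][j] = 1; every index used by either program is a key 0..n-1 produced by range(n),
-- always in range and nonnegative, so the plain Nat set is exact here.
def pvSet2 (m : List (List Int)) (i j : Int) : List (List Int) :=
  m.modify i.toNat (fun row => row.set j.toNat 1)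

-- the body of A's `for key, value in graph_sequence.items(): if x < y: ...; x += 1`,
-- returning (the updated key-value list, the updated matrix); the OrderedDict is ported
-- as its key-value list (keys 0..n-1 are distinct; popitem(last=False) = head, items() = the list).
def pvAInner (x : Nat) (y node : Int) : List (Int × Int) → List (List Int) → (List (Int × Int) × List (List Int))
  | [], adj => ([], adj)
  | (key, value) :: t, adj =>
    if (x : Int) < y then
      let adj' := pvSet2 (pvSet2 adj key node) node key
      let r := pvAInner (x + 1) y node t adj'
      ((key, value - 1) :: r.1, r.2)
    else
      let r := pvAInner (x + 1) y node t adj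
      ((key, value) :: r.1, r.2)

-- A's `while True` loop; the `[]` case is where Python's popitem raises KeyError
-- (reached only for the empty input, excluded by Pre_). Each round removes exactly one
-- dictionary entry, so fuel = initial length makes the recursion structural and exact.
def pvALoop : Nat → List (Int × Int) → List (List Int) → List (List Int)
  | 0, _, adj => adj
  | _ + 1, [], adj => adj
  | fuel + 1, (node, y) :: rest, adj =>
    let r := pvAInner 0 y node rest adj
    let gs2 := PySem.List.sorted r.1 (fun kv => kv.2) true
    if (gs2.map (fun kv => kv.2)).sum = 0 then r.2 else pvALoop fuel gs2 r.2

def convert_graph_seq_to_adj_matrix (graph_sequence : List Int) : List (List Int) :=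
  let seq_len := graph_sequence.length
  let adj_matrix := (PySem.List.pyRange 0 (seq_len : Int)).map
    (fun _ => (PySem.List.pyRange 0 (seq_len : Int)).map (fun _ => (0 : Int)))
  let gs := PySem.List.sorted graph_sequence (fun x => x) true
  -- od[i] = gs[i] for the fresh keys i = 0..n-1 appends to the key-value list
  -- (index i is in range, so the pyGetD default is never used)
  let od := (PySem.List.pyRange 0 (seq_len : Int)).foldl
    (fun d i => d ++ [(i, PySem.List.pyGetD gs i 0)]) []
  pvALoop od.length od adj_matrix

-- ===== PORT B =====
-- _merge_desc of Source B: the while loop consumes one element per pass, so the total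
-- length is an exact bound on the passes; fuel keeps the recursion structural.
def pvMergeGo : Nat → List (Int × Int) → List (Int × Int) → List (Int × Int)
  | _, [], ys => ys
  | _, x :: xs, [] => x :: xs
  | fuel + 1, a :: xs, b :: ys =>
    if b.2 ≤ a.2 then a :: pvMergeGo fuel xs (b :: ys) else b :: pvMergeGo fuel (a :: xs) ys
  | 0, _ :: _, _ :: _ => []

def pvMergeDesc (xs ys : List (Int × Int)) : List (Int × Int) :=
  pvMergeGo (xs.length + ys.length) xs ys

-- B's `while rest` loop; one entry is consumed per round, fuel = initial length is exact.
def pvBLoop : Nat → List (Int × Int) → List (List Int) → List (List Int)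
  | 0, _, adj => adj
  | _ + 1, [], adj => adj
  | fuel + 1, (node, y) :: rest, adj =>
    let k := min (max y 0).toNat rest.length
    let dec := (rest.take k).map (fun kv => (kv.1, kv.2 - 1))
    let adj2 := dec.foldl (fun m kv => pvSet2 (pvSet2 m kv.1 node) node kv.1) adj
    let rest2 := pvMergeDesc dec (rest.drop k)
    if (rest2.map (fun kv => kv.2)).sum = 0 then adj2 else pvBLoop fuel rest2 adj2

def convert_graph_seq_to_adj_matrix_alt (graph_sequence : List Int) : List (List Int) :=
  let n := graph_sequence.length
  let adj := List.replicate n (List.replicate n (0 : Int))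
  let order := PySem.List.sorted graph_sequence (fun x => x) true
  -- order[i] for i in range(n): in range, so the pyGetD default is never used
  let rest := (List.range n).map (fun (i : Nat) => ((i : Int), PySem.List.pyGetD order (i : Int) 0))
  pvBLoop rest.length rest adj

-- ===== PRECONDITION & SPEC =====
-- A raises KeyError on the empty list (popitem on an empty OrderedDict); excluded.
def Pre_convert_graph_seq_to_adj_matrix (graph_sequence : List Int) : Prop :=
  graph_sequence ≠ []
instance (graph_sequence : List Int) : Decidable (Pre_convert_graph_seq_to_adj_matrix graph_sequence) := by unfold Pre_convert_graph_seq_to_adj_matrix; infer_instance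
def pvWitness_convert_graph_seq_to_adj_matrix : List Int := [2, 1, 1]

def Spec_convert_graph_seq_to_adj_matrix (graph_sequence : List Int) (out : List (List Int)) : Prop := out = convert_graph_seq_to_adj_matrix_alt graph_sequence
instance (graph_sequence : List Int) (out : List (List Int)) : Decidable (Spec_convert_graph_seq_to_adj_matrix graph_sequence out) := by unfold Spec_convert_graph_seq_to_adj_matrix; infer_instance

-- ===== CLAIM (what is proved, stated in full; the proofs are below) =====
def Claim_equal_convert_graph_seq_to_adj_matrix : Prop := ∀ (graph_sequence : List Int), Dom_convert_graph_seq_to_adj_matrix graph_sequence → Pre_convert_graph_seq_to_adj_matrix graph_sequence → Spec_convert_graph_seq_to_adj_matrix graph_sequence (convert_graph_seq_to_adj_matrix graph_sequence)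
-- ===== LEMMAS AND PROOFS =====

-- What one round of A's item loop computes: decrement the first
-- k = min((y - x)⁺, len) entries and set the corresponding matrix entries.
theorem pvAInner_spec (l : List (Int × Int)) : ∀ (x : Nat) (y node : Int) (adj : List (List Int)),
    pvAInner x y node l adj =
      (((l.take (min (y - x).toNat l.length)).map (fun kv => (kv.1, kv.2 - 1)) ++
          l.drop (min (y - x).toNat l.length)),
        ((l.take (min (y - x).toNat l.length)).map (fun kv => (kv.1, kv.2 - 1))).foldl
          (fun m kv => pvSet2 (pvSet2 m kv.1 node) node kv.1) adj) := by
  induction l with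
  | nil => intro x y node adj; simp [pvAInner]
  | cons kv t ih =>
    intro x y node adj
    obtain ⟨key, value⟩ := kv
    by_cases h : (x : Int) < y
    · have hk : min (y - x).toNat (t.length + 1) = min (y - (x + 1 : Nat)).toNat t.length + 1 := by
        push_cast; omega
      simp only [pvAInner, h, if_pos, List.length_cons, hk, List.take_succ_cons,
        List.drop_succ_cons, List.map_cons, List.foldl_cons, ih, List.cons_append]
    · have hk : min (y - x).toNat (t.length + 1) = 0 := by push_cast at h ⊢; omega
      have hk2 : min (y - (x + 1 : Nat)).toNat t.length = 0 := by push_cast at h ⊢; omega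
      simp only [pvAInner, h, ih, List.length_cons, hk, hk2, List.take_zero,
        List.drop_zero, List.map_nil, List.foldl_nil, List.nil_append, if_false]

theorem pvMergeDesc_nil_left (ys : List (Int × Int)) : pvMergeDesc [] ys = ys := by
  cases ys <;> rfl

theorem pv_merge_nil (xs : List (Int × Int)) : pvMergeDesc xs [] = xs := by
  cases xs <;> rfl

theorem pvMergeDesc_cons_cons (a b : Int × Int) (xs ys : List (Int × Int)) :
    pvMergeDesc (a :: xs) (b :: ys) =
      if b.2 ≤ a.2 then a :: pvMergeDesc xs (b :: ys) else b :: pvMergeDesc (a :: xs) ys := by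
  show pvMergeGo (xs.length + 1 + (ys.length + 1)) (a :: xs) (b :: ys) = _
  have h1 : xs.length + 1 + (ys.length + 1) = (xs.length + (ys.length + 1)) + 1 := by omega
  rw [h1]
  simp only [pvMergeGo]
  by_cases hc : b.2 ≤ a.2
  · simp only [hc, if_true, pvMergeDesc, List.length_cons]
  · simp only [hc, if_false, pvMergeDesc, List.length_cons]
    rw [show xs.length + (ys.length + 1) = xs.length + 1 + ys.length by omega]

theorem pv_insertBy_split (b : Int × Int) (xs : List (Int × Int)) :
    PySem.List.insertBy (fun a c => decide (c.2 < a.2)) b xs =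
      xs.takeWhile (fun a => b.2 ≤ a.2) ++ b :: xs.dropWhile (fun a => b.2 ≤ a.2) := by
  induction xs with
  | nil => simp [PySem.List.insertBy]
  | cons a t ih =>
    by_cases h : a.2 < b.2
    · have : ¬ (b.2 ≤ a.2) := by omega
      simp [PySem.List.insertBy, h, this]
    · have hle : b.2 ≤ a.2 := by omega
      simp [PySem.List.insertBy, h, hle, ih]

theorem pv_insertBy_append (b : Int × Int) (p xs : List (Int × Int))
    (hp : ∀ a ∈ p, b.2 ≤ a.2) :
    PySem.List.insertBy (fun a c => decide (c.2 < a.2)) b (p ++ xs) =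
      p ++ PySem.List.insertBy (fun a c => decide (c.2 < a.2)) b xs := by
  induction p with
  | nil => simp
  | cons a t ih =>
    have : ¬ (a.2 < b.2) := by have := hp a (by simp); omega
    simp only [List.cons_append, PySem.List.insertBy, this, decide_false, Bool.false_eq_true,
      if_false]
    rw [ih (fun a ha => hp a (by simp [ha]))]

theorem pv_foldl_ins_prefix (ys : List (Int × Int)) : ∀ (p xs : List (Int × Int)),
    (∀ a ∈ p, ∀ c ∈ ys, c.2 ≤ a.2) →
    ys.foldl (fun acc x => PySem.List.insertBy (fun a c => decide (c.2 < a.2)) x acc) (p ++ xs) =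
      p ++ ys.foldl (fun acc x => PySem.List.insertBy (fun a c => decide (c.2 < a.2)) x acc) xs := by
  induction ys with
  | nil => intro p xs _; simp
  | cons b t ih =>
    intro p xs hp
    simp only [List.foldl_cons]
    rw [pv_insertBy_append b p xs (fun a ha => hp a ha b (by simp))]
    exact ih p _ (fun a ha c hc => hp a ha c (by simp [hc]))

theorem pv_merge_cons_dom (b : Int × Int) (xs ys : List (Int × Int))
    (h : ∀ c ∈ ys, c.2 ≤ b.2) :
    pvMergeDesc (b :: xs) ys = b :: pvMergeDesc xs ys := by
  cases ys with
  | nil => simp [pv_merge_nil]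
  | cons c t => rw [pvMergeDesc_cons_cons]; simp [h c (by simp)]

theorem pv_merge_split (b : Int × Int) (ys : List (Int × Int))
    (hy : ∀ c ∈ ys, c.2 ≤ b.2) : ∀ (xs : List (Int × Int)),
    pvMergeDesc xs (b :: ys) =
      xs.takeWhile (fun a => b.2 ≤ a.2) ++
        pvMergeDesc (b :: xs.dropWhile (fun a => b.2 ≤ a.2)) ys := by
  intro xs
  induction xs with
  | nil => simp [pvMergeDesc_nil_left, pv_merge_cons_dom b [] ys hy]
  | cons a t ih =>
    rw [pvMergeDesc_cons_cons]
    by_cases h : b.2 ≤ a.2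
    · simp [h, ih]
    · have hlt : a.2 < b.2 := by omega
      simp only [h, if_false, List.takeWhile_cons, List.dropWhile_cons]
      simp only [decide_false, Bool.false_eq_true, if_false, List.nil_append]
      rw [pv_merge_cons_dom b (a :: t) ys hy]

theorem pv_dropWhile_lt (b : Int × Int) (xs : List (Int × Int))
    (hx : xs.Pairwise (fun a c => c.2 ≤ a.2)) :
    ∀ a ∈ xs.dropWhile (fun a => b.2 ≤ a.2), a.2 ≤ b.2 := by
  induction xs with
  | nil => simp
  | cons a t ih =>
    by_cases h : b.2 ≤ a.2
    · simp only [List.dropWhile_cons, h, decide_true, if_true]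
      exact ih hx.tail
    · simp only [List.dropWhile_cons, h, decide_false, Bool.false_eq_true, if_false]
      intro c hc
      rcases List.mem_cons.mp hc with rfl | hct
      · omega
      · have := (List.pairwise_cons.mp hx).1 c hct; omega

theorem pv_foldl_ins_merge (ys : List (Int × Int)) : ∀ (xs : List (Int × Int)),
    xs.Pairwise (fun a c => c.2 ≤ a.2) → ys.Pairwise (fun a c => c.2 ≤ a.2) →
    ys.foldl (fun acc x => PySem.List.insertBy (fun a c => decide (c.2 < a.2)) x acc) xs =
      pvMergeDesc xs ys := by
  induction ys with
  | nil => intro xs _ _; simp [pv_merge_nil]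
  | cons b t ih =>
    intro xs hx hy
    have hyb : ∀ c ∈ t, c.2 ≤ b.2 := (List.pairwise_cons.mp hy).1
    simp only [List.foldl_cons]
    rw [pv_insertBy_split b xs]
    rw [pv_foldl_ins_prefix t _ _ (fun a ha c hc => by
      have h1 : b.2 ≤ a.2 := by have := List.mem_takeWhile_imp ha; simpa using this
      have h2 := hyb c hc; omega)]
    rw [ih (b :: xs.dropWhile (fun a => b.2 ≤ a.2))
      (List.pairwise_cons.mpr ⟨pv_dropWhile_lt b xs hx,
        (hx.sublist (List.dropWhile_sublist _)).imp (fun h => h)⟩) hy.tail]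
    rw [pv_merge_split b t hyb xs]

-- the stable reverse sort of A's round result IS B's linear merge of its two runs
theorem pv_merge_eq_sorted (xs ys : List (Int × Int))
    (hx : xs.Pairwise (fun a b => b.2 ≤ a.2)) (hy : ys.Pairwise (fun a b => b.2 ≤ a.2)) :
    PySem.List.sorted (xs ++ ys) (fun kv => kv.2) true = pvMergeDesc xs ys := by
  rw [PySem.List.sorted_rev_eq_foldl_insertBy, List.foldl_append,
    ← PySem.List.sorted_rev_eq_foldl_insertBy, PySem.List.sorted_rev_eq_self_of_pairwise xs _ hx]
  exact pv_foldl_ins_merge ys xs hx hy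

theorem pv_loop_eq : ∀ (fuel : Nat) (l : List (Int × Int)) (adj : List (List Int)),
    l.Pairwise (fun a b => b.2 ≤ a.2) → pvALoop fuel l adj = pvBLoop fuel l adj := by
  intro fuel
  induction fuel with
  | zero => intro l adj _; rfl
  | succ f ih =>
    intro l adj hp
    match l with
    | [] => rfl
    | (node, y) :: rest =>
      have hrest : rest.Pairwise (fun a b => b.2 ≤ a.2) := hp.of_cons
      simp only [pvALoop, pvBLoop, pvAInner_spec]
      have hk : (y - ((0 : Nat) : Int)).toNat = (max y 0).toNat := by
        simp only [Nat.cast_zero, sub_zero]; omega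
      rw [hk]
      set k := min (max y 0).toNat rest.length with hkdef
      have hdec : ((rest.take k).map (fun kv => (kv.1, kv.2 - 1))).Pairwise
          (fun a b => b.2 ≤ a.2) := by
        refine List.pairwise_map.mpr ?_
        exact ((hrest.sublist (List.take_sublist _ _)).imp (fun h => by simp; omega))
      have hdrop : (rest.drop k).Pairwise (fun a b => b.2 ≤ a.2) :=
        hrest.sublist (List.drop_sublist _ _)
      rw [pv_merge_eq_sorted _ _ hdec hdrop]
      by_cases hs : ((pvMergeDesc ((rest.take k).map (fun kv => (kv.1, kv.2 - 1)))
          (rest.drop k)).map (fun kv => kv.2)).sum = 0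
      · simp only [hs, if_true]
      · simp only [hs, if_false]
        refine ih _ _ ?_
        have := PySem.List.sorted_pairwise_rev
          ((rest.take k).map (fun kv => (kv.1, kv.2 - 1)) ++ rest.drop k) (fun kv : Int × Int => kv.2)
        rwa [pv_merge_eq_sorted _ _ hdec hdrop] at this

-- ===== VERDICT (by name: the statement is the Claim_ definition above) =====
theorem convert_graph_seq_to_adj_matrix_spec : Claim_equal_convert_graph_seq_to_adj_matrix := by
  intro gs _ _
  unfold Spec_convert_graph_seq_to_adj_matrix
  unfold convert_graph_seq_to_adj_matrix convert_graph_seq_to_adj_matrix_alt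
  simp only []
  have hrange : PySem.List.pyRange 0 ((gs.length : Int)) =
      (List.range gs.length).map (fun (k : Nat) => (k : Int)) := PySem.List.pyRange_zero_natCast _
  have hadj : (PySem.List.pyRange 0 ((gs.length : Int))).map
        (fun _ => (PySem.List.pyRange 0 ((gs.length : Int))).map (fun _ => (0 : Int))) =
      List.replicate gs.length (List.replicate gs.length (0 : Int)) := by
    rw [hrange]
    rw [List.map_const', List.map_const']
    simp
  have hod : (PySem.List.pyRange 0 ((gs.length : Int))).foldl
        (fun d i => d ++ [(i, PySem.List.pyGetD (PySem.List.sorted gs (fun x => x) true) i 0)])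
        ([] : List (Int × Int)) =
      (List.range gs.length).map
        (fun (i : Nat) => ((i : Int), PySem.List.pyGetD (PySem.List.sorted gs (fun x => x) true) (i : Int) 0)) := by
    rw [PySem.List.foldl_append_singleton_eq_map, hrange, List.map_map]
    rfl
  rw [hadj, hod]
  apply pv_loop_eq
  refine List.pairwise_map.mpr ?_
  have hsorted := PySem.List.sorted_pairwise_rev gs (fun x : Int => x)
  have hlen : (PySem.List.sorted gs (fun x : Int => x) true).length = gs.length :=
    PySem.List.length_sorted gs _ true
  refine List.pairwise_lt_range.imp_of_mem ?_
  intro i j hi hj hij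
  have hi' : i < gs.length := by simpa using List.mem_range.mp hi
  have hj' : j < gs.length := by simpa using List.mem_range.mp hj
  simp only [PySem.List.pyGetD_natCast]
  rw [List.getD_eq_getElem _ _ (by omega), List.getD_eq_getElem _ _ (by omega)]
  exact List.pairwise_iff_getElem.mp hsorted i j (by omega) (by omega) hij
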